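-- pv_equiv track=rewrite | github.com/Parad0x-Labs/parad0x-media-engine | parad0x_media_engine.py | build_crf_ladder
-- ===== SOURCE A (Python) =====
-- from typing import Dict, List, Optional, Tuple
--
-- def clamp_image_crf(value: int) -> int:
--     return max(18, min(40, value))
--
-- def build_crf_ladder(start_crf: int, floor_crf: int, max_attempts: int = 3) -> List[int]:
--     crfs: List[int] = []
--     current = clamp_image_crf(start_crf)
--     floor = clamp_image_crf(floor_crf)
--     while current >= floor and len(crfs) < max_attempts:
--         if current not in crfs:
--             crfs.append(current)
--         current -= 1
--     if floor not in crfs and len(crfs) < max_attempts: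
--         crfs.append(floor)
--     return crfs
-- ===== SOURCE B (Python) =====
-- from typing import List
--
-- def clamp_image_crf(value: int) -> int:
--     return max(18, min(40, value))
--
-- def build_crf_ladder(start_crf: int, floor_crf: int, max_attempts: int = 3) -> List[int]:
--     s = clamp_image_crf(start_crf)
--     f = clamp_image_crf(floor_crf)
--     if s < f:
--         # start below the floor: the descending run is empty; force the floor if allowed
--         return [f] if max_attempts > 0 else []
--     n = max(0, min(max_attempts, s - f + 1))
--     return list(range(s, s - n, -1))
-- ===== Notes on version B (the rewrite author's own statement) =====
-- stated objective: simpler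
-- what changed: Replaces A's decrement-with-membership-guard while-loop and trailing floor-append by a closed-form run length n = max(0, min(max_attempts, s-f+1)) and a single range() call, with the start-below-floor case handled up front.
import Mathlib
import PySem

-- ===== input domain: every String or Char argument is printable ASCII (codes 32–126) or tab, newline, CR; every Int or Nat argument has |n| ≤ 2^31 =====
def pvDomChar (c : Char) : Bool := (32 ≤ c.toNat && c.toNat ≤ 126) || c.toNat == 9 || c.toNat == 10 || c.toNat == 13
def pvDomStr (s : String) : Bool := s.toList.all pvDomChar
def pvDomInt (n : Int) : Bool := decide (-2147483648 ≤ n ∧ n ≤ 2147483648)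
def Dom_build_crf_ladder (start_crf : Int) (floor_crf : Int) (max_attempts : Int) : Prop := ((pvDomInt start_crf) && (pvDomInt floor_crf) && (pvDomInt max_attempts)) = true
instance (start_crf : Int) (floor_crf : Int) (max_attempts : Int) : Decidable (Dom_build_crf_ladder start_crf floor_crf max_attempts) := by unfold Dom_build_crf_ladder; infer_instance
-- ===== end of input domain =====

-- B replaces A's decrement-and-append while-loop by a closed-form run length and one range call (objective: simpler).

-- ===== PORT A =====
-- clamp_image_crf(value) = max(18, min(40, value))
def clamp_image_crf (value : Int) : Int := max 18 (min 40 value)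

-- the while-loop of A; fuel is an upper bound on the iteration count (the loop
-- decrements `current` each step and stops once current < floor, so
-- (current - floor + 1).toNat + 1 iterations always suffice); with enough fuel
-- this is exactly Python's loop.
def pvALoop : Nat → Int → Int → Int → List Int → List Int
  | 0, _, _, _, crfs => crfs
  | fuel + 1, floor, ma, current, crfs =>
    if current ≥ floor ∧ (crfs.length : Int) < ma then
      pvALoop fuel floor ma (current - 1) (if current ∈ crfs then crfs else crfs ++ [current])
    else crfs

def build_crf_ladder (start_crf : Int) (floor_crf : Int) (max_attempts : Int) : List Int :=
  let current := clamp_image_crf start_crf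
  let floor := clamp_image_crf floor_crf
  let crfs := pvALoop ((current - floor + 1).toNat + 1) floor max_attempts current []
  if floor ∉ crfs ∧ (crfs.length : Int) < max_attempts then crfs ++ [floor] else crfs

-- ===== PORT B =====
def build_crf_ladder_alt (start_crf : Int) (floor_crf : Int) (max_attempts : Int) : List Int :=
  let s := clamp_image_crf start_crf
  let f := clamp_image_crf floor_crf
  if s < f then (if max_attempts > 0 then [f] else [])
  else
    let n := max 0 (min max_attempts (s - f + 1))
    PySem.List.pyRange s (s - n) (-1)

-- ===== PRECONDITION & SPEC =====
def Spec_build_crf_ladder (start_crf : Int) (floor_crf : Int) (max_attempts : Int) (out : List Int) : Prop := out = build_crf_ladder_alt start_crf floor_crf max_attempts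
instance (start_crf : Int) (floor_crf : Int) (max_attempts : Int) (out : List Int) : Decidable (Spec_build_crf_ladder start_crf floor_crf max_attempts out) := by unfold Spec_build_crf_ladder; infer_instance

-- ===== CLAIM (what is proved, stated in full; the proofs are below) =====
def Claim_equal_build_crf_ladder : Prop := ∀ (start_crf : Int) (floor_crf : Int) (max_attempts : Int), Dom_build_crf_ladder start_crf floor_crf max_attempts → Spec_build_crf_ladder start_crf floor_crf max_attempts (build_crf_ladder start_crf floor_crf max_attempts)

-- ===== LEMMAS AND PROOFS =====

theorem clamp_idem (x : Int) : clamp_image_crf (clamp_image_crf x) = clamp_image_crf x := by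
  simp only [clamp_image_crf]; omega

theorem clamp_lb (x : Int) : 18 ≤ clamp_image_crf x := by simp only [clamp_image_crf]; omega
theorem clamp_ub (x : Int) : clamp_image_crf x ≤ 40 := by simp only [clamp_image_crf]; omega

-- the loop result does not depend on max_attempts once it exceeds the iteration bound
theorem pvALoop_ma (fuel : Nat) (floor ma ma' current : Int) (crfs : List Int)
    (h : (crfs.length : Int) + max 0 (current - floor + 1) ≤ ma)
    (h' : (crfs.length : Int) + max 0 (current - floor + 1) ≤ ma') :
    pvALoop fuel floor ma current crfs = pvALoop fuel floor ma' current crfs := by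
  induction fuel generalizing current crfs with
  | zero => rfl
  | succ fuel ih =>
    by_cases hc : floor ≤ current
    · have h1 : (crfs.length : Int) < ma := by omega
      have h2 : (crfs.length : Int) < ma' := by omega
      rw [pvALoop, pvALoop,
        if_pos (show current ≥ floor ∧ (crfs.length : Int) < ma from ⟨hc, h1⟩),
        if_pos (show current ≥ floor ∧ (crfs.length : Int) < ma' from ⟨hc, h2⟩)]
      have hlen : ((if current ∈ crfs then crfs else crfs ++ [current]).length : Int)
          ≤ (crfs.length : Int) + 1 := by
        split <;> simp
      exact ih _ _ (by omega) (by omega)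
    · rw [pvALoop, pvALoop, if_neg (by tauto), if_neg (by tauto)]

theorem pvALoop_len (fuel : Nat) (floor ma current : Int) (crfs : List Int) :
    (pvALoop fuel floor ma current crfs).length ≤ crfs.length + fuel := by
  induction fuel generalizing current crfs with
  | zero => simp [pvALoop]
  | succ fuel ih =>
    rw [pvALoop]
    split
    · refine le_trans (ih _ _) ?_
      split
      · simp
      · simp
        omega
    · omega

-- A's value depends only on the clamped arguments and on max_attempts capped to [0, 25]
theorem A_reduce (s f ma : Int) :
    build_crf_ladder s f ma
      = build_crf_ladder (clamp_image_crf s) (clamp_image_crf f) (max 0 (min ma 25)) := by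
  have hs1 := clamp_lb s; have hs2 := clamp_ub s
  have hf1 := clamp_lb f; have hf2 := clamp_ub f
  simp only [build_crf_ladder, clamp_idem]
  set cur := clamp_image_crf s with hcur
  set fl := clamp_image_crf f with hfl
  set fuel := (cur - fl + 1).toNat + 1 with hfuel
  have hloop : pvALoop fuel fl ma cur [] = pvALoop fuel fl (max 0 (min ma 25)) cur [] := by
    by_cases hm : 0 ≤ ma ∧ ma ≤ 25
    · have : max 0 (min ma 25) = ma := by omega
      rw [this]
    · by_cases hneg : ma < 0
      · have hM : max 0 (min ma 25) = 0 := by omega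
        rw [hM]
        cases fuel with
        | zero => rfl
        | succ fuel =>
          rw [pvALoop, pvALoop,
            if_neg (show ¬(cur ≥ fl ∧ (([] : List Int).length : Int) < ma) from by simp; omega),
            if_neg (show ¬(cur ≥ fl ∧ (([] : List Int).length : Int) < (0 : Int)) from by simp)]
      · -- ma > 25
        exact pvALoop_ma _ _ _ _ _ _ (by simp; omega) (by simp; omega)
  rw [hloop]
  set r := pvALoop fuel fl (max 0 (min ma 25)) cur [] with hr
  have hrl : r.length ≤ fuel := by
    have := pvALoop_len fuel fl (max 0 (min ma 25)) cur []
    simpa using this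
  have hcond : ((r.length : Int) < ma) ↔ ((r.length : Int) < max 0 (min ma 25)) := by
    have hfb : (fuel : Int) ≤ 24 := by omega
    have : (r.length : Int) ≤ 24 := by
      have : (r.length : Int) ≤ (fuel : Int) := by exact_mod_cast hrl
      omega
    omega
  by_cases hmem : fl ∈ r
  · simp [hmem]
  · simp only [hmem, not_false_iff, true_and]
    by_cases h1 : (r.length : Int) < ma
    · rw [if_pos h1, if_pos (hcond.mp h1)]
    · rw [if_neg h1, if_neg (fun h => h1 (hcond.mpr h))]

-- B's value likewise
theorem B_reduce (s f ma : Int) :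
    build_crf_ladder_alt s f ma
      = build_crf_ladder_alt (clamp_image_crf s) (clamp_image_crf f) (max 0 (min ma 25)) := by
  have hs1 := clamp_lb s; have hs2 := clamp_ub s
  have hf1 := clamp_lb f; have hf2 := clamp_ub f
  simp only [build_crf_ladder_alt, clamp_idem]
  have hn : max 0 (min ma (clamp_image_crf s - clamp_image_crf f + 1))
      = max 0 (min (max 0 (min ma 25)) (clamp_image_crf s - clamp_image_crf f + 1)) := by
    omega
  by_cases hlt : clamp_image_crf s < clamp_image_crf f
  · by_cases hm : 0 < ma
    · have hm' : 0 < max 0 (min ma 25) := by omega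
      simp [hlt, hm, hm']
    · have hm' : ¬ 0 < max 0 (min ma 25) := by omega
      simp [hlt, hm, hm']
  · rw [if_neg hlt, if_neg hlt, hn]

-- the finite core: all clamped starts/floors and capped attempt counts
set_option maxHeartbeats 4000000 in
theorem core : ∀ a : Nat, a < 23 → ∀ b : Nat, b < 23 → ∀ c : Nat, c < 26 →
    build_crf_ladder (18 + (a : Int)) (18 + (b : Int)) (c : Int)
      = build_crf_ladder_alt (18 + (a : Int)) (18 + (b : Int)) (c : Int) := by
  decide

-- ===== VERDICT (by name: the statement is the Claim_ definition above) =====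
theorem build_crf_ladder_spec : Claim_equal_build_crf_ladder := by
  intro s f ma _
  show build_crf_ladder s f ma = build_crf_ladder_alt s f ma
  rw [A_reduce, B_reduce]
  have hs1 := clamp_lb s; have hs2 := clamp_ub s
  have hf1 := clamp_lb f; have hf2 := clamp_ub f
  have ha : (clamp_image_crf s - 18).toNat < 23 := by omega
  have hb : (clamp_image_crf f - 18).toNat < 23 := by omega
  have hc : (max 0 (min ma 25)).toNat < 26 := by omega
  have e1 : clamp_image_crf s = 18 + (((clamp_image_crf s - 18).toNat : Nat) : Int) := by omega
  have e2 : clamp_image_crf f = 18 + (((clamp_image_crf f - 18).toNat : Nat) : Int) := by omega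
  have e3 : max 0 (min ma 25) = (((max 0 (min ma 25)).toNat : Nat) : Int) := by omega
  rw [e1, e2, e3]
  exact core _ ha _ hb _ hc
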